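-- pv_equiv track=rewrite | github.com/pythononwheels/diary | library/pow3_lib.py | singularize
-- ===== SOURCE A (Python) =====
-- def singularize(word):
--     # taken from:http://codelog.blogial.com/2008/07/27/singular-form-of-a-word-in-python/
--     sing_rules = [lambda w: w[-3:] == 'ies' and w[:-3] + 'y',
--               lambda w: w[-4:] == 'ives' and w[:-4] + 'ife',
--               lambda w: w[-3:] == 'ves' and w[:-3] + 'f',
--               lambda w: w[-2:] == 'es' and w[:-2],
--               lambda w: w[-1:] == 's' and w[:-1],
--               lambda w: w,
--               ]
--     word = word.strip()
--     singleword = [f(word) for f in sing_rules if f(word) is not False][0]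
--     return singleword
-- ===== SOURCE B (Python) =====
-- # Table-driven longest-suffix match: since no two applicable suffixes of equal
-- # length can match the same word, longest match coincides with A's rule order.
-- SING_RULES = {'ies': 'y', 'ives': 'ife', 'ves': 'f', 'es': '', 's': '', '': ''}
--
-- def singularize(word):
--     word = word.strip()
--     best = max((s for s in SING_RULES if word.endswith(s)), key=len)
--     return word[:len(word) - len(best)] + SING_RULES[best]
-- ===== Notes on version B (the rewrite author's own statement) =====
-- stated objective: alternative
-- what changed: Replaces the ordered list of rule-lambdas with first-truthy selection by a suffix->replacement table queried by longest matching suffix (max over the matching keys by length); since no two distinct matching suffixes ever have equal length, longest match coincides with A's rule priority.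
import Mathlib
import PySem

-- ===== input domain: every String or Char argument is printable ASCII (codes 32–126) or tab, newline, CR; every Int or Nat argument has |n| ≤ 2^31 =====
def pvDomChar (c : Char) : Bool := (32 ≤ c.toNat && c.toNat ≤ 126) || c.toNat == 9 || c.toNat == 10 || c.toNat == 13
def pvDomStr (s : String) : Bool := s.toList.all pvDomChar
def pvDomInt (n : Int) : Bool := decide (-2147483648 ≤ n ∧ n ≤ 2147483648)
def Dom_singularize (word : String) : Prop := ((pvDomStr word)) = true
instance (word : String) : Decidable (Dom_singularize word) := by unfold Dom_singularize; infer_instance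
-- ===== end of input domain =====

-- B replaces A's ordered rule-lambda list (first truthy result wins) with a suffix->replacement table queried by LONGEST matching suffix; equal because no two distinct matching suffixes share a length.


-- ===== PORT A =====
-- the six rule-lambdas; Option replaces Python's False (none = the lambda returned False)
def singRules : List (List Char → Option (List Char)) :=
  [ fun w => if PySem.List.slice w (some (-3)) none = "ies".toList then some (PySem.List.slice w none (some (-3)) ++ "y".toList) else none,
    fun w => if PySem.List.slice w (some (-4)) none = "ives".toList then some (PySem.List.slice w none (some (-4)) ++ "ife".toList) else none,
    fun w => if PySem.List.slice w (some (-3)) none = "ves".toList then some (PySem.List.slice w none (some (-3)) ++ "f".toList) else none,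
    fun w => if PySem.List.slice w (some (-2)) none = "es".toList then some (PySem.List.slice w none (some (-2))) else none,
    fun w => if PySem.List.slice w (some (-1)) none = "s".toList then some (PySem.List.slice w none (some (-1))) else none,
    fun w => some w ]

def singularize (word : String) : String :=
  let w := PySem.Chars.strip word.toList
  -- [f(word) for f in sing_rules if f(word) is not False][0]
  String.ofList ((singRules.filterMap (fun f => f w)).headD [])

-- ===== PORT B =====
-- SING_RULES, a dict in insertion order
def singTable : PySem.Dict (List Char) (List Char) :=
  PySem.Dict.mk [("ies".toList, "y".toList), ("ives".toList, "ife".toList),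
                 ("ves".toList, "f".toList), ("es".toList, []), ("s".toList, []), ([], [])]

def singularize_alt (word : String) : String :=
  let w := PySem.Chars.strip word.toList
  -- max((s for s in SING_RULES if word.endswith(s)), key=len): the '' key always
  -- matches, so the candidate list is never empty; getD [] covers the impossible none
  let best := (PySem.List.max? (singTable.keys.filter (fun s => PySem.Chars.endswith w s))
                (fun s => s.length)).getD []
  String.ofList (w.take (w.length - best.length) ++ singTable.getD best [])

-- ===== PRECONDITION & SPEC =====
def Spec_singularize (word : String) (out : String) : Prop := out = singularize_alt word
instance (word : String) (out : String) : Decidable (Spec_singularize word out) := by unfold Spec_singularize; infer_instance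

-- ===== CLAIM (what is proved, stated in full; the proofs are below) =====
def Claim_equal_singularize : Prop := ∀ (word : String), Dom_singularize word → Spec_singularize word (singularize word)

-- ===== LEMMAS AND PROOFS =====

-- A's truthiness test `w[-k:] == p` is a suffix test, for p of length k
theorem drop_eq_iff_suffix (w p : List Char) : (w.drop (w.length - p.length) = p) ↔ p <:+ w := by
  constructor
  · intro h; rw [← h]; exact List.drop_suffix _ _
  · intro h
    obtain ⟨t, rfl⟩ := h
    simp

theorem slice_cond_iff (w p : List Char) (k : Nat) (hk : 0 < k) (hp : p.length = k) :
    (PySem.List.slice w (some (-(k : Int))) none = p) ↔ PySem.Chars.endswith w p = true := by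
  rw [PySem.List.slice_from_neg_natCast w k hk, PySem.Chars.endswith_iff, ← hp, drop_eq_iff_suffix]

-- two suffixes of the same word with equal lengths are equal
theorem suffix_eq_of_length {p q w : List Char} (hp : p <:+ w) (hq : q <:+ w)
    (h : p.length = q.length) : p = q := by
  have hp' := (drop_eq_iff_suffix w p).mpr hp
  have hq' := (drop_eq_iff_suffix w q).mpr hq
  rw [← hp', ← hq', h]

theorem endswith_trans {w p q : List Char} (hpq : q <:+ p)
    (h : PySem.Chars.endswith w p = true) : PySem.Chars.endswith w q = true := by
  rw [PySem.Chars.endswith_iff] at h ⊢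
  exact hpq.trans h

theorem endswith_conflict {w p q : List Char} (hlen : p.length = q.length) (hne : p ≠ q)
    (hp : PySem.Chars.endswith w p = true) : PySem.Chars.endswith w q = true → False := by
  intro hq
  rw [PySem.Chars.endswith_iff] at hp hq
  exact hne (suffix_eq_of_length hp hq hlen)

set_option maxHeartbeats 2000000 in
-- ===== VERDICT (by name: the statement is the Claim_ definition above) =====
theorem singularize_spec : Claim_equal_singularize := by
  intro word _
  show singularize word = singularize_alt word
  unfold singularize singularize_alt singRules singTable
  set w := PySem.Chars.strip word.toList with hw
  have h3 : (PySem.List.slice w (some (-3)) none = ['i','e','s']) ↔ PySem.Chars.endswith w ['i','e','s'] = true :=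
    slice_cond_iff w "ies".toList 3 (by omega) (by decide)
  have h4 : (PySem.List.slice w (some (-4)) none = ['i','v','e','s']) ↔ PySem.Chars.endswith w ['i','v','e','s'] = true :=
    slice_cond_iff w "ives".toList 4 (by omega) (by decide)
  have hv : (PySem.List.slice w (some (-3)) none = ['v','e','s']) ↔ PySem.Chars.endswith w ['v','e','s'] = true :=
    slice_cond_iff w "ves".toList 3 (by omega) (by decide)
  have h2 : (PySem.List.slice w (some (-2)) none = ['e','s']) ↔ PySem.Chars.endswith w ['e','s'] = true :=
    slice_cond_iff w "es".toList 2 (by omega) (by decide)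
  have h1 : (PySem.List.slice w (some (-1)) none = ['s']) ↔ PySem.Chars.endswith w ['s'] = true :=
    slice_cond_iff w "s".toList 1 (by omega) (by decide)
  have h0 : PySem.Chars.endswith w [] = true := by
    rw [PySem.Chars.endswith_iff]; exact List.nil_suffix
  by_cases c3 : PySem.Chars.endswith w ['i','e','s'] = true <;>
    by_cases c4 : PySem.Chars.endswith w ['i','v','e','s'] = true <;>
    by_cases cv : PySem.Chars.endswith w ['v','e','s'] = true <;>
    by_cases c2 : PySem.Chars.endswith w ['e','s'] = true <;>
    by_cases c1 : PySem.Chars.endswith w ['s'] = true <;>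
    first
      | exact absurd (endswith_trans (by decide) c3) c2
      | exact absurd (endswith_trans (by decide) c3) c1
      | exact absurd (endswith_trans (by decide) c4) cv
      | exact absurd (endswith_trans (by decide) c4) c2
      | exact absurd (endswith_trans (by decide) c4) c1
      | exact absurd (endswith_trans (by decide) cv) c2
      | exact absurd (endswith_trans (by decide) cv) c1
      | exact absurd (endswith_trans (by decide) c2) c1
      | exact absurd (endswith_conflict (by decide) (by decide) c3 cv) id
      | simp [List.filterMap, PySem.Dict.keys_mk, List.filter, h3, h4, hv, h2, h1, h0,
              c3, c4, cv, c2, c1, PySem.List.max?, PySem.Dict.getD, PySem.Dict.get?,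
              PySem.List.slice_to_neg_ofNat, PySem.List.slice_to_neg_one,
              List.dropLast_eq_take, List.take_length]
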